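-- pv_equiv track=rewrite | github.com/uvsq22202731/projet-IN304 | Modules/Top_K_Utilisateurs.py | Publications_par_Utilisateurs
-- ===== SOURCE A (Python) =====
-- def Publications_par_Utilisateurs(data):
--     """Compte le nombre de publications par utilisateur."""
--     publications_par_utilisateur = {}
--     for i in data:  # On parcourt tous les tweets
--         utilisateur = i["Utilisateur"]
--         if utilisateur in publications_par_utilisateur:     # Si utilisateur est déjà dans notre dictionnaire on ajoute 1 au nombres de publicationd
--             publications_par_utilisateur[utilisateur] += 1
--         else:
--             publications_par_utilisateur[utilisateur] = 1   # Sinon on initialise à 1 son nombre de tweet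
--
--     return publications_par_utilisateur
-- ===== SOURCE B (Python) =====
-- def Publications_par_Utilisateurs(data):
--     """Compte le nombre de publications par utilisateur."""
--     users = [i["Utilisateur"] for i in data]
--     pairs = []
--     remaining = users
--     while remaining:
--         u = remaining[0]
--         pairs.append((u, remaining.count(u)))
--         remaining = [x for x in remaining if x != u]
--     return dict(pairs)
-- ===== Notes on version B (the rewrite author's own statement) =====
-- stated objective: alternative
-- what changed: Replaces A's single-pass dict accumulation with a shrinking-worklist loop: repeatedly take the first remaining user, emit (user, remaining.count(user)), filter out all its occurrences, and build the dict from the collected pairs at the end.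
import Mathlib
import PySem

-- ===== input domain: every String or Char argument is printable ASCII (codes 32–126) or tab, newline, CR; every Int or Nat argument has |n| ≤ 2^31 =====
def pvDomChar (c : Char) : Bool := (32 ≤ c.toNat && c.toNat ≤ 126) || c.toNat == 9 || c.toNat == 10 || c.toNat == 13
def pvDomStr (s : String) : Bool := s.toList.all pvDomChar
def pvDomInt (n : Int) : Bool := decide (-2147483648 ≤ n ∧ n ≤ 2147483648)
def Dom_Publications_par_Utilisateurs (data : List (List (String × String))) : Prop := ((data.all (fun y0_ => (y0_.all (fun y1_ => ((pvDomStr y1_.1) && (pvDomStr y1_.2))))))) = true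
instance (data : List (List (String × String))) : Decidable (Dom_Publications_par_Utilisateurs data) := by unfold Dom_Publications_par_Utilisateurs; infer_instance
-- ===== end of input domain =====

-- ===== PORT A =====
-- A: single pass over data, hash-dict accumulation (membership test, then += 1 / = 1).
-- i["Utilisateur"] is a first-match lookup on the association list; the `.getD ""` default
-- is only a totalizer: Pre_ guarantees the key is present (Python raises KeyError otherwise).
def Publications_par_Utilisateurs (data : List (List (String × String))) : List (String × Int) :=
  (data.foldl
    (fun d i =>
      let utilisateur := ((PySem.Dict.mk i).get? "Utilisateur").getD ""
      if d.contains utilisateur then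
        d.insert utilisateur (d.getD utilisateur 0 + 1)
      else
        d.insert utilisateur 1)
    (PySem.Dict.empty : PySem.Dict String Int)).items

-- ===== PORT B =====
-- B: worklist loop — take the first remaining user, record (u, remaining.count(u)),
-- filter all its occurrences out of the worklist, then build the dict from the pairs.
def pubLoop (remaining : List String) (pairs : List (String × Int)) : List (String × Int) :=
  match remaining with
  | [] => pairs
  | u :: rest =>
      pubLoop ((u :: rest).filter (fun x => x ≠ u))
              (pairs ++ [(u, ((u :: rest).count u : Int))])
termination_by remaining.length
decreasing_by
  have h : (u :: rest).filter (fun x => x ≠ u) = rest.filter (fun x => x ≠ u) := by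
    simp
  rw [h]
  exact Nat.lt_succ_of_le (List.length_filter_le _ _)

def Publications_par_Utilisateurs_alt (data : List (List (String × String))) : List (String × Int) :=
  (PySem.Dict.ofList
    (pubLoop (data.map (fun i => ((PySem.Dict.mk i).get? "Utilisateur").getD "")) [])).items

-- ===== PRECONDITION & SPEC =====
-- Pre_ excludes exactly the rows with no "Utilisateur" key, on which Python A raises KeyError.
def Pre_Publications_par_Utilisateurs (data : List (List (String × String))) : Prop :=
  ∀ i ∈ data, "Utilisateur" ∈ i.map Prod.fst
instance (data : List (List (String × String))) : Decidable (Pre_Publications_par_Utilisateurs data) := by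
  unfold Pre_Publications_par_Utilisateurs; infer_instance
def pvWitness_Publications_par_Utilisateurs : (List (List (String × String))) :=
  [[("Utilisateur", "alice")], [("Utilisateur", "bob")], [("Utilisateur", "alice")]]

def Spec_Publications_par_Utilisateurs (data : List (List (String × String))) (out : List (String × Int)) : Prop := out = Publications_par_Utilisateurs_alt data
instance (data : List (List (String × String))) (out : List (String × Int)) : Decidable (Spec_Publications_par_Utilisateurs data out) := by unfold Spec_Publications_par_Utilisateurs; infer_instance

-- ===== CLAIM (what is proved, stated in full; the proofs are below) =====
def Claim_equal_Publications_par_Utilisateurs : Prop := ∀ (data : List (List (String × String))), Dom_Publications_par_Utilisateurs data → Pre_Publications_par_Utilisateurs data → Spec_Publications_par_Utilisateurs data (Publications_par_Utilisateurs data)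

-- ===== LEMMAS AND PROOFS =====
-- A's conditional step is exactly the counter step d.insert u (d.getD u 0 + 1).
lemma pubA_step_eq (d : PySem.Dict String Int) (u : String) :
    (if d.contains u then d.insert u (d.getD u 0 + 1) else d.insert u 1) =
      d.insert u (d.getD u 0 + 1) := by
  by_cases h : d.contains u = true
  · simp [h]
  · simp only [Bool.not_eq_true] at h
    rw [if_neg (by simp [h]), PySem.Dict.getD_of_not_contains d 0 h]
    norm_num

-- set(filter p xs) is filter p (set(xs)): first occurrences survive filtering.
lemma ofList_filter (p : String → Bool) (xs : List String) :
    PySem.Set.ofList (xs.filter p) = (PySem.Set.ofList xs).filter p := by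
  induction xs with
  | nil => rfl
  | cons x xs ih =>
    rw [List.filter_cons]
    by_cases hp : p x = true
    · rw [if_pos hp, PySem.Set.ofList_cons, PySem.Set.ofList_cons]
      simp only [PySem.Set.discard, List.filter_cons, hp, if_pos, ih]
      rw [List.filter_filter, List.filter_filter]
      congr 1
      apply List.filter_congr
      intro y _
      exact Bool.and_comm _ _
    · rw [if_neg (by simp [hp]), PySem.Set.ofList_cons, ih]
      simp only [List.filter_cons, hp]
      rw [PySem.Set.discard, List.filter_filter]
      apply List.filter_congr
      intro y hy
      by_cases hyx : y = x
      · subst hyx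
        have : p y = false := by simpa using hp
        simp [this]
      · simp [hyx]

-- The worklist loop appends exactly Counter(users).items() to the accumulator
-- (strong induction on the worklist length, since the loop recurses on a filtered list).
lemma pubLoop_eq_aux (n : Nat) :
    ∀ remaining : List String, remaining.length ≤ n → ∀ pairs : List (String × Int),
      pubLoop remaining pairs =
        pairs ++ (PySem.Set.ofList remaining).map
          (fun k => (k, (remaining.count k : Int))) := by
  induction n with
  | zero =>
    intro remaining h pairs
    have : remaining = [] := List.eq_nil_of_length_eq_zero (Nat.le_zero.mp h)
    subst this
    rw [pubLoop]
    simp [PySem.Set.ofList]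
  | succ n ih =>
    intro remaining h pairs
    match remaining with
    | [] => rw [pubLoop]; simp [PySem.Set.ofList]
    | u :: rest =>
      have hfil : (u :: rest).filter (fun x => x ≠ u) = rest.filter (fun x => x ≠ u) := by
        simp
      have hlen : ((u :: rest).filter (fun x => x ≠ u)).length ≤ n := by
        rw [hfil]
        exact Nat.le_trans (List.length_filter_le _ _) (Nat.le_of_succ_le_succ h)
      rw [pubLoop, ih _ hlen, List.append_assoc, List.singleton_append,
          PySem.Set.ofList_cons, List.map_cons]
      congr 1
      congr 1
      rw [hfil]
      have hset : PySem.Set.ofList (rest.filter (fun x => x ≠ u)) =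
          (PySem.Set.ofList rest).discard u := by
        rw [ofList_filter, PySem.Set.discard]
        apply List.filter_congr
        intro y _
        by_cases hyu : y = u <;> simp [hyu]
      rw [hset]
      apply List.map_congr_left
      intro k hk
      have hku : k ≠ u := ((PySem.Set.mem_discard _ _ _).mp hk).2
      have h1 : (rest.filter (fun x => x ≠ u)).count k = rest.count k :=
        List.count_filter (by simpa using hku)
      have h2 : (u :: rest).count k = rest.count k := by
        have hbk : (u == k) = false := by simpa using Ne.symm hku
        rw [List.count_cons, hbk]; simp
      rw [h1, h2]

lemma pubLoop_eq (remaining : List String) (pairs : List (String × Int)) :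
    pubLoop remaining pairs =
      pairs ++ (PySem.Set.ofList remaining).map
        (fun k => (k, (remaining.count k : Int))) :=
  pubLoop_eq_aux remaining.length remaining (Nat.le_refl _) pairs

-- keys of the produced pairs are the distinct users, hence Nodup.
lemma pubPairs_keys (users : List String) :
    (pubLoop users []).map Prod.fst = PySem.Set.ofList users := by
  rw [pubLoop_eq, List.nil_append, List.map_map,
      show (Prod.fst ∘ fun k : String => (k, (users.count k : Int))) = id from rfl,
      List.map_id]

-- ===== VERDICT (by name: the statement is the Claim_ definition above) =====
theorem Publications_par_Utilisateurs_spec : Claim_equal_Publications_par_Utilisateurs := by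
  intro data _ _
  show Publications_par_Utilisateurs data = Publications_par_Utilisateurs_alt data
  unfold Publications_par_Utilisateurs Publications_par_Utilisateurs_alt
  rw [show (fun (d : PySem.Dict String Int) (i : List (String × String)) =>
        let utilisateur := ((PySem.Dict.mk i).get? "Utilisateur").getD ""
        if d.contains utilisateur then d.insert utilisateur (d.getD utilisateur 0 + 1)
        else d.insert utilisateur 1) =
      (fun d i => PySem.Dict.insert d (((PySem.Dict.mk i).get? "Utilisateur").getD "")
        (d.getD (((PySem.Dict.mk i).get? "Utilisateur").getD "") 0 + 1)) from
    funext fun d => funext fun i => pubA_step_eq d _]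
  rw [← List.foldl_map (f := fun i => ((PySem.Dict.mk i).get? "Utilisateur").getD "")
        (g := fun (d : PySem.Dict String Int) u => PySem.Dict.insert d u (d.getD u 0 + 1))]
  generalize (data.map (fun i => ((PySem.Dict.mk i).get? "Utilisateur").getD "")) = users
  rw [PySem.Dict.foldl_insert_getD_add_one_eq_counter, PySem.Dict.items_counter]
  rw [pubLoop_eq, List.nil_append]
  rw [PySem.Dict.ofList, PySem.Dict.update]
  rw [PySem.Dict.items_foldl_insert_fresh _ Prod.fst Prod.snd _
        (by intro a _; simp [PySem.Dict.contains_empty])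
        (by rw [show (PySem.Set.ofList users).map (fun k => (k, (users.count k : Int)))
                  = pubLoop users [] from (by rw [pubLoop_eq, List.nil_append]),
               pubPairs_keys]
            exact PySem.Set.nodup_ofList users)]
  simp [PySem.Dict.empty]
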